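-- pv_equiv track=rewrite | github.com/winnsterx/sc_verifier_server | rl_difficulty_analysis.py | categorize_by_difficulty
-- ===== SOURCE A (Python) =====
-- def categorize_by_difficulty(difficulty_map):
--     """Categorize levels into 5 difficulty groups"""
--     # Define difficulty categories
--     categories = {
--         "Very Easy (0-1)": [],
--         "Easy (2-3)": [],
--         "Medium (4-5)": [],
--         "Hard (6-7)": [],
--         "Very Hard (8)": []
--     }
--
--     for level_id, difficulty in difficulty_map.items():
--         if difficulty <= 1:
--             categories["Very Easy (0-1)"].append(level_id)
--         elif difficulty <= 3:
--             categories["Easy (2-3)"].append(level_id)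
--         elif difficulty <= 5:
--             categories["Medium (4-5)"].append(level_id)
--         elif difficulty <= 7:
--             categories["Hard (6-7)"].append(level_id)
--         else:
--             categories["Very Hard (8)"].append(level_id)
--
--     return categories
-- ===== SOURCE B (Python) =====
-- def categorize_by_difficulty(difficulty_map):
--     """Categorize levels into 5 difficulty groups"""
--     items = difficulty_map.items()
--     return {
--         "Very Easy (0-1)": [k for k, d in items if d <= 1],
--         "Easy (2-3)":      [k for k, d in items if 1 < d <= 3],
--         "Medium (4-5)":    [k for k, d in items if 3 < d <= 5],
--         "Hard (6-7)":      [k for k, d in items if 5 < d <= 7],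
--         "Very Hard (8)":   [k for k, d in items if 7 < d],
--     }
-- ===== Notes on version B (the rewrite author's own statement) =====
-- stated objective: idiomatic
-- what changed: Replaces the single-pass if-elif cascade that mutates bucket lists with a dict literal of five independent range-filter comprehensions over the items.
import Mathlib
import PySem

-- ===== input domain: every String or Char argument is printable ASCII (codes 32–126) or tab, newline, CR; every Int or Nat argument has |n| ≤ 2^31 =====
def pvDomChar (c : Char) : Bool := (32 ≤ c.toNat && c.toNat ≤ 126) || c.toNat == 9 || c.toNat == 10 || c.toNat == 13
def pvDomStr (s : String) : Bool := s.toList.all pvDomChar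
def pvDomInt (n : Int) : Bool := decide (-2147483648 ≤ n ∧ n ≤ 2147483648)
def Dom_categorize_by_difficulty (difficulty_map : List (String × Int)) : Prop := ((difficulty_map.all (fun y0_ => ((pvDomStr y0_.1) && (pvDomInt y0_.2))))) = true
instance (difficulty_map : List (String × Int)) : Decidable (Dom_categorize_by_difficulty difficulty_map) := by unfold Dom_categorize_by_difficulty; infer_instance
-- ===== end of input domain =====

-- B replaces A's single-pass if-elif cascade with five independent range-filter
-- comprehensions, one per bucket (idiomatic dict literal; same O(n) cost).

-- ===== PORT A =====
def categorize_by_difficulty (difficulty_map : List (String × Int)) : List (String × List String) :=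
  let categories : PySem.Dict String (List String) :=
    PySem.Dict.ofList [("Very Easy (0-1)", []), ("Easy (2-3)", []), ("Medium (4-5)", []),
                       ("Hard (6-7)", []), ("Very Hard (8)", [])]
  let categories := difficulty_map.foldl (fun d p =>
    if p.2 ≤ 1 then d.modify "Very Easy (0-1)" [] (· ++ [p.1])
    else if p.2 ≤ 3 then d.modify "Easy (2-3)" [] (· ++ [p.1])
    else if p.2 ≤ 5 then d.modify "Medium (4-5)" [] (· ++ [p.1])
    else if p.2 ≤ 7 then d.modify "Hard (6-7)" [] (· ++ [p.1])
    else d.modify "Very Hard (8)" [] (· ++ [p.1])) categories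
  categories.items

-- ===== PORT B =====
def categorize_by_difficulty_alt (difficulty_map : List (String × Int)) : List (String × List String) :=
  [("Very Easy (0-1)", (difficulty_map.filter (fun p => p.2 ≤ 1)).map (·.1)),
   ("Easy (2-3)",      (difficulty_map.filter (fun p => 1 < p.2 && p.2 ≤ 3)).map (·.1)),
   ("Medium (4-5)",    (difficulty_map.filter (fun p => 3 < p.2 && p.2 ≤ 5)).map (·.1)),
   ("Hard (6-7)",      (difficulty_map.filter (fun p => 5 < p.2 && p.2 ≤ 7)).map (·.1)),
   ("Very Hard (8)",   (difficulty_map.filter (fun p => 7 < p.2)).map (·.1))]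

-- ===== PRECONDITION & SPEC =====
def Spec_categorize_by_difficulty (difficulty_map : List (String × Int)) (out : List (String × List String)) : Prop := out = categorize_by_difficulty_alt difficulty_map
instance (difficulty_map : List (String × Int)) (out : List (String × List String)) : Decidable (Spec_categorize_by_difficulty difficulty_map out) := by unfold Spec_categorize_by_difficulty; infer_instance

-- ===== CLAIM (what is proved, stated in full; the proofs are below) =====
def Claim_equal_categorize_by_difficulty : Prop := ∀ (difficulty_map : List (String × Int)), Dom_categorize_by_difficulty difficulty_map → Spec_categorize_by_difficulty difficulty_map (categorize_by_difficulty difficulty_map)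

-- ===== LEMMAS AND PROOFS =====

-- A's loop over an explicit 5-bucket dict: each step appends to the bucket chosen by the cascade.
theorem categorize_loop_items (l : List (String × Int))
    (v1 v2 v3 v4 v5 : List String) :
    (l.foldl (fun d p =>
      if p.2 ≤ 1 then d.modify "Very Easy (0-1)" [] (· ++ [p.1])
      else if p.2 ≤ 3 then d.modify "Easy (2-3)" [] (· ++ [p.1])
      else if p.2 ≤ 5 then d.modify "Medium (4-5)" [] (· ++ [p.1])
      else if p.2 ≤ 7 then d.modify "Hard (6-7)" [] (· ++ [p.1])
      else d.modify "Very Hard (8)" [] (· ++ [p.1]))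
      (PySem.Dict.ofList [("Very Easy (0-1)", v1), ("Easy (2-3)", v2), ("Medium (4-5)", v3),
                          ("Hard (6-7)", v4), ("Very Hard (8)", v5)])).items =
    [("Very Easy (0-1)", v1 ++ (l.filter (fun p => p.2 ≤ 1)).map (·.1)),
     ("Easy (2-3)",      v2 ++ (l.filter (fun p => 1 < p.2 && p.2 ≤ 3)).map (·.1)),
     ("Medium (4-5)",    v3 ++ (l.filter (fun p => 3 < p.2 && p.2 ≤ 5)).map (·.1)),
     ("Hard (6-7)",      v4 ++ (l.filter (fun p => 5 < p.2 && p.2 ≤ 7)).map (·.1)),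
     ("Very Hard (8)",   v5 ++ (l.filter (fun p => 7 < p.2)).map (·.1))] := by
  induction l generalizing v1 v2 v3 v4 v5 with
  | nil => simp [PySem.Dict.ofList, PySem.Dict.update, PySem.Dict.empty, PySem.Dict.insert, PySem.Dict.contains]
  | cons p l ih =>
    rcases p with ⟨k, d⟩
    simp only [List.foldl_cons, List.filter_cons]
    by_cases h1 : d ≤ 1
    · rw [if_pos h1]
      have e : (PySem.Dict.ofList [("Very Easy (0-1)", v1), ("Easy (2-3)", v2), ("Medium (4-5)", v3), ("Hard (6-7)", v4), ("Very Hard (8)", v5)]).modify "Very Easy (0-1)" [] (· ++ [k]) = PySem.Dict.ofList [("Very Easy (0-1)", v1 ++ [k]), ("Easy (2-3)", v2), ("Medium (4-5)", v3), ("Hard (6-7)", v4), ("Very Hard (8)", v5)] := rfl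
      rw [e, ih (v1 ++ [k]) (v2) (v3) (v4) (v5)]
      simp [h1, List.append_assoc, (show ¬(1:Int) < d by omega), (show ¬(3:Int) < d by omega), (show ¬(5:Int) < d by omega), (show ¬(7:Int) < d by omega)]
    · rw [if_neg h1]
      by_cases h2 : d ≤ 3
      · rw [if_pos h2]
        have e : (PySem.Dict.ofList [("Very Easy (0-1)", v1), ("Easy (2-3)", v2), ("Medium (4-5)", v3), ("Hard (6-7)", v4), ("Very Hard (8)", v5)]).modify "Easy (2-3)" [] (· ++ [k]) = PySem.Dict.ofList [("Very Easy (0-1)", v1), ("Easy (2-3)", v2 ++ [k]), ("Medium (4-5)", v3), ("Hard (6-7)", v4), ("Very Hard (8)", v5)] := rfl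
        rw [e, ih (v1) (v2 ++ [k]) (v3) (v4) (v5)]
        simp [h1, h2, List.append_assoc, (show (1:Int) < d by omega), (show ¬(3:Int) < d by omega), (show ¬(5:Int) < d by omega), (show ¬(7:Int) < d by omega)]
      · rw [if_neg h2]
        by_cases h3 : d ≤ 5
        · rw [if_pos h3]
          have e : (PySem.Dict.ofList [("Very Easy (0-1)", v1), ("Easy (2-3)", v2), ("Medium (4-5)", v3), ("Hard (6-7)", v4), ("Very Hard (8)", v5)]).modify "Medium (4-5)" [] (· ++ [k]) = PySem.Dict.ofList [("Very Easy (0-1)", v1), ("Easy (2-3)", v2), ("Medium (4-5)", v3 ++ [k]), ("Hard (6-7)", v4), ("Very Hard (8)", v5)] := rfl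
          rw [e, ih (v1) (v2) (v3 ++ [k]) (v4) (v5)]
          simp [h1, h2, h3, List.append_assoc, (show (3:Int) < d by omega), (show ¬(5:Int) < d by omega), (show ¬(7:Int) < d by omega)]
        · rw [if_neg h3]
          by_cases h4 : d ≤ 7
          · rw [if_pos h4]
            have e : (PySem.Dict.ofList [("Very Easy (0-1)", v1), ("Easy (2-3)", v2), ("Medium (4-5)", v3), ("Hard (6-7)", v4), ("Very Hard (8)", v5)]).modify "Hard (6-7)" [] (· ++ [k]) = PySem.Dict.ofList [("Very Easy (0-1)", v1), ("Easy (2-3)", v2), ("Medium (4-5)", v3), ("Hard (6-7)", v4 ++ [k]), ("Very Hard (8)", v5)] := rfl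
            rw [e, ih (v1) (v2) (v3) (v4 ++ [k]) (v5)]
            simp [h1, h2, h3, h4, List.append_assoc, (show (5:Int) < d by omega), (show ¬(7:Int) < d by omega)]
          · rw [if_neg h4]
            have e : (PySem.Dict.ofList [("Very Easy (0-1)", v1), ("Easy (2-3)", v2), ("Medium (4-5)", v3), ("Hard (6-7)", v4), ("Very Hard (8)", v5)]).modify "Very Hard (8)" [] (· ++ [k]) = PySem.Dict.ofList [("Very Easy (0-1)", v1), ("Easy (2-3)", v2), ("Medium (4-5)", v3), ("Hard (6-7)", v4), ("Very Hard (8)", v5 ++ [k])] := rfl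
            rw [e, ih (v1) (v2) (v3) (v4) (v5 ++ [k])]
            simp [h1, h2, h3, h4, List.append_assoc, (show (7:Int) < d by omega)]

-- ===== VERDICT (by name: the statement is the Claim_ definition above) =====
theorem categorize_by_difficulty_spec : Claim_equal_categorize_by_difficulty := by
  intro dm _
  show _ = _
  simpa [categorize_by_difficulty, categorize_by_difficulty_alt] using
    categorize_loop_items dm [] [] [] [] []
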